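-- pv_equiv track=rewrite | github.com/bigdata-ustc/EduNLP | EduNLP/SIF/tokenization/formula/linear_token.py | connect_char
-- ===== SOURCE A (Python) =====
-- def connect_char(words):  # pragma: no cover
--     result = []
--     buffer = ""
--     for w in words:
--         w = w.strip()
--         if len(w) > 1:
--             if len(buffer) > 0:
--                 result.append(buffer)
--                 buffer = ""
--             result.append(w)
--
--         elif len(w) == 1:
--             if not w.isalpha():
--                 if len(buffer) > 0:
--                     result.append(buffer)
--                 buffer = ""
--                 result.append(w)
--             else:
--                 buffer += w
--     if len(buffer) > 0:
--         result.append(buffer)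
--         buffer = ""
--     return result
-- ===== SOURCE B (Python) =====
-- from itertools import groupby
--
--
-- def connect_char(words):
--     stripped = [w.strip() for w in words]
--     stripped = [w for w in stripped if w != '']
--     result = []
--     for is_single_alpha, group in groupby(
--             stripped, key=lambda w: len(w) == 1 and w.isalpha()):
--         if is_single_alpha:
--             result.append(''.join(group))
--         else:
--             result.extend(group)
--     return result
-- ===== Notes on version B (the rewrite author's own statement) =====
-- stated objective: idiomatic
-- what changed: Replaces A's buffer/flush state machine with a strip-filter-groupby pipeline: consecutive single-alpha words are grouped by itertools.groupby and joined, other words are emitted as-is.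
import Mathlib
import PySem

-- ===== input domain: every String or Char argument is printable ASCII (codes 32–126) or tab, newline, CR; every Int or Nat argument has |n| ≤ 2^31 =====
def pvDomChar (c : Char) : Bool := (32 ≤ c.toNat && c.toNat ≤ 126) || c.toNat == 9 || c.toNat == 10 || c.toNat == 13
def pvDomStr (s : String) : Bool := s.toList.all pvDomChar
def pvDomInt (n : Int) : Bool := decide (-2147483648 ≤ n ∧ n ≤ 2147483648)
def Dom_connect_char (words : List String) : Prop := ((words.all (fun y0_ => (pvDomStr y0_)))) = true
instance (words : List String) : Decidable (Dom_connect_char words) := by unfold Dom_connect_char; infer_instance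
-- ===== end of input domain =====

-- B replaces A's buffer/flush state machine by a strip-filter-groupby pipeline; same return values.

-- ===== PORT A =====
-- one iteration of A's for-loop: state = (result, buffer)
def pvStepA (st : List String × String) (w0 : String) : List String × String :=
  let w := PySem.Str.strip w0
  if 1 < PySem.Str.len w then
    ((if 0 < PySem.Str.len st.2 then st.1 ++ [st.2] else st.1) ++ [w], "")
  else if PySem.Str.len w = 1 then
    if ¬ PySem.Str.strIsalpha w then
      ((if 0 < PySem.Str.len st.2 then st.1 ++ [st.2] else st.1) ++ [w], "")
    else (st.1, st.2 ++ w)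
  else st

def connect_char (words : List String) : List String :=
  let st := words.foldl pvStepA ([], "")
  if 0 < PySem.Str.len st.2 then st.1 ++ [st.2] else st.1

-- ===== PORT B =====
-- groupby key: len(w) == 1 and w.isalpha()
def pvKey (w : String) : Bool := PySem.Str.len w == 1 && PySem.Str.strIsalpha w

-- itertools.groupby over runs of consecutive equal keys; single-alpha runs are joined,
-- every other run is emitted element by element
def pvGroups : List String → List String
  | [] => []
  | w :: ws =>
    let run := ws.takeWhile (fun x => pvKey x == pvKey w)
    let rest := ws.dropWhile (fun x => pvKey x == pvKey w)
    (if pvKey w then [PySem.Str.join "" (w :: run)] else w :: run) ++ pvGroups rest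
  termination_by ws => ws.length
  decreasing_by
    simp only [List.length_cons]
    exact Nat.lt_succ_of_le (List.length_dropWhile_le _ _)

def connect_char_alt (words : List String) : List String :=
  pvGroups ((words.map PySem.Str.strip).filter (fun w => w ≠ ""))

-- ===== PRECONDITION & SPEC =====
def Spec_connect_char (words : List String) (out : List String) : Prop := out = connect_char_alt words
instance (words : List String) (out : List String) : Decidable (Spec_connect_char words out) := by unfold Spec_connect_char; infer_instance

-- ===== CLAIM (what is proved, stated in full; the proofs are below) =====
def Claim_equal_connect_char : Prop := ∀ (words : List String), Dom_connect_char words → Spec_connect_char words (connect_char words)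

-- ===== LEMMAS AND PROOFS =====

-- A's loop body for an already-stripped nonempty word: accumulate or flush-and-emit
def pvStepCore (st : List String × String) (w : String) : List String × String :=
  if pvKey w then (st.1, st.2 ++ w)
  else ((if 0 < PySem.Str.len st.2 then st.1 ++ [st.2] else st.1) ++ [w], "")

-- A's remaining run as a function of the words still to process and the pending buffer
def pvF : List String → String → List String
  | [], buf => if 0 < PySem.Str.len buf then [buf] else []
  | w :: ws, buf =>
    if pvKey w then pvF ws (buf ++ w)
    else (if 0 < PySem.Str.len buf then [buf] else []) ++ w :: pvF ws ""

-- pvGroups with a nonempty pending buffer merged into a leading single-alpha run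
def pvMerge (buf : String) : List String → List String
  | [] => [buf]
  | w :: ws =>
    if pvKey w then
      (buf ++ PySem.Str.join "" (w :: ws.takeWhile (fun x => pvKey x == pvKey w))) ::
        pvGroups (ws.dropWhile (fun x => pvKey x == pvKey w))
    else buf :: pvGroups (w :: ws)

lemma pvGroups_cons (w : String) (ws : List String) :
    pvGroups (w :: ws) =
      (if pvKey w then [PySem.Str.join "" (w :: ws.takeWhile (fun x => pvKey x == pvKey w))]
       else w :: ws.takeWhile (fun x => pvKey x == pvKey w)) ++
        pvGroups (ws.dropWhile (fun x => pvKey x == pvKey w)) := by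
  rw [pvGroups]

lemma pv_len_pos_iff (s : String) : 0 < PySem.Str.len s ↔ s ≠ "" := by
  rw [PySem.Str.len_eq]
  constructor
  · intro h hs; subst hs; simp at h
  · intro h
    have : s.toList ≠ [] := fun hc => h (String.toList_inj.mp (by simp [hc]))
    have := List.length_pos_iff.mpr this
    exact_mod_cast this

lemma pv_key_iff (w : String) :
    pvKey w = true ↔ PySem.Str.len w = 1 ∧ PySem.Str.strIsalpha w = true := by
  unfold pvKey
  rw [Bool.and_eq_true, beq_iff_eq]

lemma pv_stepA_core (st : List String × String) (w0 : String)
    (h : PySem.Str.strip w0 ≠ "") : pvStepA st w0 = pvStepCore st (PySem.Str.strip w0) := by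
  have hpos : 0 < PySem.Str.len (PySem.Str.strip w0) := (pv_len_pos_iff _).mpr h
  unfold pvStepA pvStepCore
  by_cases hk : pvKey (PySem.Str.strip w0) = true
  · obtain ⟨he, ha⟩ := (pv_key_iff _).mp hk
    rw [if_pos hk, if_neg (by omega : ¬ 1 < PySem.Str.len (PySem.Str.strip w0)),
      if_pos he, if_neg (by exact fun hc => hc ha)]
  · rw [if_neg hk]
    by_cases h1 : 1 < PySem.Str.len (PySem.Str.strip w0)
    · rw [if_pos h1]
    · have he : PySem.Str.len (PySem.Str.strip w0) = 1 := by omega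
      have ha : ¬ PySem.Str.strIsalpha (PySem.Str.strip w0) = true :=
        fun hc => hk ((pv_key_iff _).mpr ⟨he, hc⟩)
      rw [if_neg h1, if_pos he, if_pos ha]

lemma pv_stepA_empty (st : List String × String) (w0 : String)
    (h : PySem.Str.strip w0 = "") : pvStepA st w0 = st := by
  simp [pvStepA, h, PySem.Str.len_eq]

lemma pv_foldl_core (words : List String) : ∀ st : List String × String,
    words.foldl pvStepA st =
      ((words.map PySem.Str.strip).filter (fun w => w ≠ "")).foldl pvStepCore st := by
  induction words with
  | nil => intro st; simp only [List.foldl_nil, List.map_nil, List.filter_nil]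
  | cons w0 rest ih =>
    intro st
    simp only [List.foldl_cons, List.map_cons, List.filter_cons]
    by_cases h : PySem.Str.strip w0 = ""
    · rw [pv_stepA_empty st w0 h, if_neg (by simp [h]), ih]
    · rw [if_pos (by simp [h]), List.foldl_cons, pv_stepA_core st w0 h, ih]

lemma pv_foldl_F (ws : List String) : ∀ (res : List String) (buf : String),
    (if 0 < PySem.Str.len (ws.foldl pvStepCore (res, buf)).2
     then (ws.foldl pvStepCore (res, buf)).1 ++ [(ws.foldl pvStepCore (res, buf)).2]
     else (ws.foldl pvStepCore (res, buf)).1) = res ++ pvF ws buf := by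
  induction ws with
  | nil =>
    intro res buf
    simp only [List.foldl_nil, pvF]
    split_ifs <;> simp
  | cons w ws ih =>
    intro res buf
    by_cases hk : pvKey w = true
    · simp only [List.foldl_cons, pvStepCore, hk, if_pos, pvF]
      exact ih res (buf ++ w)
    · simp only [List.foldl_cons, pvStepCore, hk, pvF, Bool.false_eq_true, if_false]
      rw [ih]
      split_ifs <;> simp

lemma pvGroups_nil : pvGroups [] = [] := by rw [pvGroups]

lemma pv_key_append_pos (buf w : String) (hk : pvKey w = true) :
    0 < PySem.Str.len (buf ++ w) := by
  have h1 : PySem.Str.len w = 1 := ((pv_key_iff w).mp hk).1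
  have hnn : (0 : Int) ≤ PySem.Str.len buf := by
    rw [PySem.Str.len_eq]; exact_mod_cast Nat.zero_le _
  rw [PySem.Str.len_append]; omega

lemma pv_join_cons (w : String) (l : List String) (hl : l ≠ []) :
    PySem.Str.join "" (w :: l) = w ++ PySem.Str.join "" l := by
  apply String.toList_inj.mp
  cases l with
  | nil => simp at hl
  | cons q r => simp [PySem.Str.toList_join, PySem.Chars.join_cons_cons]

lemma pv_join_singleton (w : String) : PySem.Str.join "" [w] = w := by
  apply String.toList_inj.mp
  simp [PySem.Str.toList_join, PySem.Chars.join_singleton]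

lemma pv_buf_empty (buf : String) (h : ¬ 0 < PySem.Str.len buf) : buf = "" := by
  by_contra hc
  exact h ((pv_len_pos_iff buf).mpr hc)

lemma pv_empty_not_pos : ¬ 0 < PySem.Str.len "" := by
  intro h
  exact ((pv_len_pos_iff "").mp h) rfl

lemma pv_merge_key (buf w : String) (ws : List String) (hk : pvKey w = true) :
    pvMerge (buf ++ w) ws =
      (buf ++ PySem.Str.join "" (w :: ws.takeWhile (fun x => pvKey x == pvKey w))) ::
        pvGroups (ws.dropWhile (fun x => pvKey x == pvKey w)) := by
  cases ws with
  | nil => simp [pvMerge, pv_join_singleton, pvGroups_nil]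
  | cons w' ws' =>
    by_cases hk' : pvKey w' = true
    · simp only [pvMerge, hk', hk, beq_self_eq_true, if_true, List.takeWhile_cons,
        List.dropWhile_cons, if_pos]
      rw [pv_join_cons w (w' :: List.takeWhile (fun x => pvKey x == true) ws') (by simp),
        String.append_assoc]
    · simp only [pvMerge, hk', hk, Bool.false_eq_true, if_false, List.takeWhile_cons,
        List.dropWhile_cons, beq_self_eq_true, if_true]
      simp [hk', pv_join_singleton]

lemma pv_groups_cons_notkey (w : String) (ws : List String) (hk : ¬ pvKey w = true) :
    pvGroups (w :: ws) = w :: pvGroups ws := by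
  rw [pvGroups_cons, if_neg hk]
  cases ws with
  | nil => simp
  | cons w' ws' =>
    by_cases hk' : pvKey w' = true
    · simp [List.takeWhile_cons, List.dropWhile_cons, hk, hk']
    · simp only [List.takeWhile_cons, List.dropWhile_cons, hk, hk']
      rw [pvGroups_cons w' ws']
      simp [hk, hk']

lemma pv_F_spec (ws : List String) : ∀ buf : String,
    pvF ws buf = if 0 < PySem.Str.len buf then pvMerge buf ws else pvGroups ws := by
  induction ws with
  | nil =>
    intro buf
    simp only [pvF, pvMerge, pvGroups_nil]
  | cons w ws ih =>
    intro buf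
    by_cases hk : pvKey w = true
    · have hstep : pvF (w :: ws) buf = pvF ws (buf ++ w) := by simp [pvF, hk]
      rw [hstep, ih (buf ++ w), if_pos (pv_key_append_pos buf w hk), pv_merge_key buf w ws hk]
      by_cases hb : 0 < PySem.Str.len buf
      · rw [if_pos hb]
        simp [pvMerge, hk]
      · rw [if_neg hb, pv_buf_empty buf hb, pvGroups_cons, if_pos hk]
        simp
    · have hstep : pvF (w :: ws) buf =
          (if 0 < PySem.Str.len buf then [buf] else []) ++ w :: pvF ws "" := by
        simp [pvF, hk]
      rw [hstep, ih "", if_neg pv_empty_not_pos, pv_groups_cons_notkey w ws hk]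
      by_cases hb : 0 < PySem.Str.len buf
      · rw [if_pos hb, if_pos hb]
        simp [pvMerge, hk, pv_groups_cons_notkey w ws hk]
      · rw [if_neg hb, if_neg hb]
        simp

-- ===== VERDICT (by name: the statement is the Claim_ definition above) =====
theorem connect_char_spec : Claim_equal_connect_char := by
  intro words _
  unfold Spec_connect_char connect_char connect_char_alt
  rw [pv_foldl_core]
  have h := pv_foldl_F ((words.map PySem.Str.strip).filter (fun w => w ≠ "")) [] ""
  simp only [] at h ⊢
  rw [h, pv_F_spec _ "", if_neg pv_empty_not_pos]
  simp
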